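-- pv_equiv track=rewrite | github.com/AWHKU/epistasisCalculator | epistasisCalc.py | libVariants
-- ===== SOURCE A (Python) =====
-- def joinAA(aalist):
--  key=""
--  for i in range (2):
--   key+=aalist[i]+","
--  key=key.strip(",")
--  return key
--
-- def libVariants(obsDict,wtseq):
--  libs=[]
--  for an in range (2):
--   lst=list(obsDict[joinAA(wtseq)])
--   lst[1]=0
--   t=tuple(lst)
--   libs.append({wtseq[an]:t})
--   for dr in obsDict:
--    if obsDict[dr][-1][an] != wtseq[an]:
--     ew=0
--     for i in range (2):
--      if obsDict[dr][-1][i] == wtseq[i]: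
--       ew+=1
--     if ew == 1:
--      libs[an][obsDict[dr][-1][an]]=obsDict[joinAA(obsDict[dr][-1])]
--  return libs
-- ===== SOURCE B (Python) =====
-- def joinAA(aalist):
--     key = ""
--     for i in range(2):
--         key += aalist[i] + ","
--     key = key.strip(",")
--     return key
--
--
-- def libVariants(obsDict, wtseq):
--     # one classifying pass over obsDict instead of two per-position scans
--     lst = list(obsDict[joinAA(wtseq)])
--     lst[1] = 0
--     t = tuple(lst)
--     libs = [{wtseq[0]: t}, {wtseq[1]: t}]
--     for dr in obsDict:
--         var = obsDict[dr][-1]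
--         diffs = [p for p in range(2) if var[p] != wtseq[p]]
--         if len(diffs) == 1:
--             p = diffs[0]
--             libs[p][var[p]] = obsDict[joinAA(var)]
--     return libs
-- ===== Notes on version B (the rewrite author's own statement) =====
-- stated objective: alternative
-- what changed: B replaces A's two per-position passes over obsDict (one filtering scan per library position) with a single classifying pass that computes the list of differing positions for each entry and dispatches single mutants directly to libs[p], initializing both libraries up front.
import Mathlib
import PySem

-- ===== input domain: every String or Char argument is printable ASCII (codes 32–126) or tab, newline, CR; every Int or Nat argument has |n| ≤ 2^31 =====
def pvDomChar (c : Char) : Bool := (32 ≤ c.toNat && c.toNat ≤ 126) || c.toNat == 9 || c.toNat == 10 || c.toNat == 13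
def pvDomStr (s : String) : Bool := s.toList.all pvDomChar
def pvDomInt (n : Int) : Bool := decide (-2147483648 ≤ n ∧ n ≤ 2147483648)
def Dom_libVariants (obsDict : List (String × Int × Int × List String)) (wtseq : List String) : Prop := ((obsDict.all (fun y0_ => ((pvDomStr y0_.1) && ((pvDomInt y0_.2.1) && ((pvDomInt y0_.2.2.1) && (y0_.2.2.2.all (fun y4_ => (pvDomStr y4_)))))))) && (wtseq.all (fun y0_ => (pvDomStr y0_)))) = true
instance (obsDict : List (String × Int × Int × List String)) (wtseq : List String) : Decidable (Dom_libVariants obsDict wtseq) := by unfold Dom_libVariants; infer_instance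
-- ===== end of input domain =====

-- B replaces A's two per-position filtering passes over obsDict by one classifying pass
-- that dispatches each single mutant to its library; equivalence of the return value is proved below.

-- shared module helper joinAA (both Pythons use the identical helper)
def joinAA (aalist : List String) : String :=
  String.ofList (PySem.Chars.stripChars
    ((PySem.List.pyRange 0 2 1).foldl
      (fun key i => key ++ (PySem.List.pyGetD aalist i "").toList ++ [',']) [])
    [','])

-- ===== PORT A =====
def libVariants (obsDict : List (String × Int × Int × List String)) (wtseq : List String) : List (List (String × Int × Int × List String)) :=
  let d : PySem.Dict String (Int × Int × List String) := PySem.Dict.mk obsDict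
  let libs := (PySem.List.pyRange 0 2 1).foldl (fun libs an =>
    let v := d.getD (joinAA wtseq) (0, 0, [])
    let t := (v.1, (0 : Int), v.2.2)
    let lib := d.keys.foldl (fun lib dr =>
      let vr := (d.getD dr (0, 0, [])).2.2
      if PySem.List.pyGetD vr an "" ≠ PySem.List.pyGetD wtseq an "" then
        let ew := (PySem.List.pyRange 0 2 1).foldl
          (fun ew i => if PySem.List.pyGetD vr i "" = PySem.List.pyGetD wtseq i "" then ew + 1 else ew) (0 : Int)
        if ew = 1 then lib.insert (PySem.List.pyGetD vr an "") (d.getD (joinAA vr) (0, 0, []))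
        else lib
      else lib)
      ((PySem.Dict.empty).insert (PySem.List.pyGetD wtseq an "") t)
    libs ++ [lib]) []
  libs.map (fun lib => lib.items)

-- ===== PORT B =====
def libVariants_alt (obsDict : List (String × Int × Int × List String)) (wtseq : List String) : List (List (String × Int × Int × List String)) :=
  let d : PySem.Dict String (Int × Int × List String) := PySem.Dict.mk obsDict
  let v := d.getD (joinAA wtseq) (0, 0, [])
  let t := (v.1, (0 : Int), v.2.2)
  let libs0 : PySem.Dict String (Int × Int × List String) × PySem.Dict String (Int × Int × List String) :=
    ((PySem.Dict.empty).insert (PySem.List.pyGetD wtseq 0 "") t,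
     (PySem.Dict.empty).insert (PySem.List.pyGetD wtseq 1 "") t)
  let libs := d.keys.foldl (fun libs dr =>
    let var := (d.getD dr (0, 0, [])).2.2
    let diffs := (PySem.List.pyRange 0 2 1).filter
      (fun p => PySem.List.pyGetD var p "" ≠ PySem.List.pyGetD wtseq p "")
    if diffs.length = 1 then
      let p := PySem.List.pyGetD diffs 0 0
      if p = 0 then
        (libs.1.insert (PySem.List.pyGetD var p "") (d.getD (joinAA var) (0, 0, [])), libs.2)
      else
        (libs.1, libs.2.insert (PySem.List.pyGetD var p "") (d.getD (joinAA var) (0, 0, [])))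
    else libs) libs0
  [libs.1.items, libs.2.items]

-- ===== PRECONDITION & SPEC =====
-- Pre_ excludes exactly: inputs where Python A raises (wtseq or some variant list shorter than 2
-- → IndexError; the wild-type key, or the key of a single mutant's own sequence, absent from
-- obsDict → KeyError), and assoc lists with duplicate keys, which do not denote any Python dict.
def Pre_libVariants (obsDict : List (String × Int × Int × List String)) (wtseq : List String) : Prop :=
  2 ≤ wtseq.length ∧
  (obsDict.map (fun p => p.1)).Nodup ∧
  joinAA wtseq ∈ obsDict.map (fun p => p.1) ∧
  ∀ p ∈ obsDict, 2 ≤ p.2.2.2.length ∧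
    (((p.2.2.2.getD 0 "" ≠ wtseq.getD 0 "" ∧ p.2.2.2.getD 1 "" = wtseq.getD 1 "") ∨
      (p.2.2.2.getD 0 "" = wtseq.getD 0 "" ∧ p.2.2.2.getD 1 "" ≠ wtseq.getD 1 "")) →
      joinAA p.2.2.2 ∈ obsDict.map (fun p => p.1))
instance (obsDict : List (String × Int × Int × List String)) (wtseq : List String) : Decidable (Pre_libVariants obsDict wtseq) := by unfold Pre_libVariants; infer_instance

def pvWitness_libVariants : (List (String × Int × Int × List String)) × List String :=
  ([("A,B", (5, 3, ["A", "B"]))], ["A", "B"])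

def Spec_libVariants (obsDict : List (String × Int × Int × List String)) (wtseq : List String) (out : List (List (String × Int × Int × List String))) : Prop := out = libVariants_alt obsDict wtseq
instance (obsDict : List (String × Int × Int × List String)) (wtseq : List String) (out : List (List (String × Int × Int × List String))) : Decidable (Spec_libVariants obsDict wtseq out) := by unfold Spec_libVariants; infer_instance

-- ===== CLAIM (what is proved, stated in full; the proofs are below) =====
def Claim_equal_libVariants : Prop := ∀ (obsDict : List (String × Int × Int × List String)) (wtseq : List String), Dom_libVariants obsDict wtseq → Pre_libVariants obsDict wtseq → Spec_libVariants obsDict wtseq (libVariants obsDict wtseq)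

-- ===== LEMMAS AND PROOFS =====

-- a fold that updates the two components of a pair independently is the pair of the two folds
theorem pair_foldl {α β γ : Type} (L : List α) (f0 : β → α → β) (f1 : γ → α → γ)
    (g : β × γ → α → β × γ) (hg : ∀ s x, g s x = (f0 s.1 x, f1 s.2 x)) :
    ∀ init : β × γ, L.foldl g init = (L.foldl f0 init.1, L.foldl f1 init.2) := by
  induction L with
  | nil => intro init; rfl
  | cons a L ih => intro init; simp only [List.foldl_cons, hg]; exact ih _

-- ===== VERDICT =====
theorem libVariants_spec : Claim_equal_libVariants := by
  intro obsDict wtseq _hDom _hPre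
  unfold Spec_libVariants libVariants libVariants_alt
  simp only []
  rw [pair_foldl (f0 := fun lib dr =>
        let vr := ((PySem.Dict.mk obsDict).getD dr (0, 0, [])).2.2
        if PySem.List.pyGetD vr 0 "" ≠ PySem.List.pyGetD wtseq 0 "" then
          let ew := (PySem.List.pyRange 0 2 1).foldl
            (fun ew i => if PySem.List.pyGetD vr i "" = PySem.List.pyGetD wtseq i "" then ew + 1 else ew) (0 : Int)
          if ew = 1 then lib.insert (PySem.List.pyGetD vr 0 "") ((PySem.Dict.mk obsDict).getD (joinAA vr) (0, 0, []))
          else lib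
        else lib)
      (f1 := fun lib dr =>
        let vr := ((PySem.Dict.mk obsDict).getD dr (0, 0, [])).2.2
        if PySem.List.pyGetD vr 1 "" ≠ PySem.List.pyGetD wtseq 1 "" then
          let ew := (PySem.List.pyRange 0 2 1).foldl
            (fun ew i => if PySem.List.pyGetD vr i "" = PySem.List.pyGetD wtseq i "" then ew + 1 else ew) (0 : Int)
          if ew = 1 then lib.insert (PySem.List.pyGetD vr 1 "") ((PySem.Dict.mk obsDict).getD (joinAA vr) (0, 0, []))
          else lib
        else lib)]
  · rfl
  · intro s dr
    have hr : PySem.List.pyRange 0 2 1 = [(0 : Int), 1] := by decide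
    have e0 : PySem.List.pyGetD [(0 : Int)] 0 0 = 0 := by decide
    have e1 : PySem.List.pyGetD [(1 : Int)] 0 0 = 1 := by decide
    simp only [hr, List.filter_cons, List.filter_nil, List.foldl_cons, List.foldl_nil]
    by_cases h0 : PySem.List.pyGetD ((PySem.Dict.mk obsDict).getD dr (0, 0, [])).2.2 0 "" = PySem.List.pyGetD wtseq 0 "" <;>
      by_cases h1 : PySem.List.pyGetD ((PySem.Dict.mk obsDict).getD dr (0, 0, [])).2.2 1 "" = PySem.List.pyGetD wtseq 1 "" <;>
        simp [h0, h1, e0, e1]
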